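-- pv_equiv track=rewrite | github.com/DaredevilSlim/Python | Checkio/Strings_theory/stressful_subject.py | is_stressful
-- ===== SOURCE A (Python) =====
-- def is_stressful(subj: str) -> bool:
--     if subj and ('!!!' == subj[-3:] or subj.isupper()):
--         return True
--     s = 'i'
--     for i in subj:
--         i = i.lower()
--         if i.isalpha() and i != s[-1]:
--             s += i
--     for i in ('help', 'asap', 'urgent'):
--         if i in s:
--             return True
--     return False
-- ===== SOURCE B (Python) =====
-- def is_stressful(subj: str) -> bool:
--     if subj and (subj.endswith('!!!') or subj.isupper()):
--         return True
--     letters = [c.lower() for c in subj if c.isalpha()]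
--     n = len(letters)
--
--     def match_from(i, kw):
--         # repetition-tolerant match: consume one run of each keyword letter in turn
--         for c in kw:
--             if i >= n or letters[i] != c:
--                 return False
--             while i < n and letters[i] == c:
--                 i += 1
--         return True
--
--     return any(match_from(i, kw)
--                for kw in ('help', 'asap', 'urgent') for i in range(n))
-- ===== Notes on version B (the rewrite author's own statement) =====
-- stated objective: alternative
-- what changed: A builds a sentinel-seeded run-collapsed copy of the letters and then does substring search for the keywords; B never builds a collapsed string: it scans the lowercased letter sequence from every start position with a repetition-tolerant matcher that consumes one run of each keyword letter in turn (correct because the collapsed string contains a keyword iff the letter sequence contains a block h+e+l+p+ etc.).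
import Mathlib
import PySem

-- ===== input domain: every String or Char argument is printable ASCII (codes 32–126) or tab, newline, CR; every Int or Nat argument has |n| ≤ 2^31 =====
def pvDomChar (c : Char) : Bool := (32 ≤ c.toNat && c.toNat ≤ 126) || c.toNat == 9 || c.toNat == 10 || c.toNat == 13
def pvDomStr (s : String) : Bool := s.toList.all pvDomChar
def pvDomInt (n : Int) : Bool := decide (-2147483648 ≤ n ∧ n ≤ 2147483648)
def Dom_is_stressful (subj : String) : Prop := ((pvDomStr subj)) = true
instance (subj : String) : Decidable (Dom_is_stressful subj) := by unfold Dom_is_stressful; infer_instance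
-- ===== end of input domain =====

-- B drops A's run-collapsed accumulator string entirely: it matches each keyword directly against the
-- lowercased letter sequence with a repetition-tolerant scan from every start; same value everywhere
-- (no speed claim).

-- hand port of Python str.isupper(): at least one cased character and no lowercase one; exact on the
-- ASCII domain, where PySem.Chars.isupper/islower cover exactly the cased characters
def pyStrIsupper (l : List Char) : Bool :=
  l.any PySem.Chars.isupper && !(l.any PySem.Chars.islower)

-- ===== PORT A =====
def is_stressful (subj : String) : Bool :=
  let l := subj.toList
  if !l.isEmpty && ((['!', '!', '!'] == PySem.Chars.slice l (some (-3)) none) || pyStrIsupper l) then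
    true
  else
    let s := l.foldl (fun s c =>
      let c := PySem.Chars.lowerChar c
      if PySem.Chars.isalpha c && (PySem.List.pyGet? s (-1) != some c) then s ++ [c] else s) ['i']
    ["help".toList, "asap".toList, "urgent".toList].any (fun k => PySem.Chars.isIn k s)

-- ===== PORT B =====
-- B-side helpers: skip_run / matches from Source B, step for step
def skipRun (c : Char) : List Char → List Char
  | [] => []
  | x :: t => if x = c then skipRun c t else x :: t

def matchKw : List Char → List Char → Bool
  | [], _ => true
  | _ :: _, [] => false
  | c :: ks, x :: t => if x = c then matchKw ks (skipRun c t) else false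

def is_stressful_alt (subj : String) : Bool :=
  let l := subj.toList
  if !l.isEmpty && (PySem.Chars.endswith l ['!', '!', '!'] || pyStrIsupper l) then
    true
  else
    let letters := (l.filter PySem.Chars.isalpha).map PySem.Chars.lowerChar
    ["help".toList, "asap".toList, "urgent".toList].any (fun kw =>
      (List.range letters.length).any (fun i => matchKw kw (letters.drop i)))

-- ===== PRECONDITION & SPEC =====
def Spec_is_stressful (subj : String) (out : Bool) : Prop := out = is_stressful_alt subj
instance (subj : String) (out : Bool) : Decidable (Spec_is_stressful subj out) := by unfold Spec_is_stressful; infer_instance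

-- ===== CLAIM (what is proved, stated in full; the proofs are below) =====
def Claim_equal_is_stressful : Prop := ∀ (subj : String), Dom_is_stressful subj → Spec_is_stressful subj (is_stressful subj)

-- ===== LEMMAS AND PROOFS =====

-- proof-side characterisation of A's loop: consecutive-duplicate collapse relative to a previous char
def collapse : Char → List Char → List Char
  | _, [] => []
  | p, c :: t => if c = p then collapse p t else c :: collapse c t

lemma toNat_ofNat_valid (n : Nat) (h : n.isValidChar) : (Char.ofNat n).toNat = n := by
  simp [Char.ofNat, h, Char.toNat, Char.ofNatAux]

lemma isalpha_lowerChar (c : Char) :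
    PySem.Chars.isalpha (PySem.Chars.lowerChar c) = PySem.Chars.isalpha c := by
  by_cases h : 'A' ≤ c ∧ c ≤ 'Z'
  · have hlo : 65 ≤ c.toNat := UInt32.le_iff_toNat_le.mp (Char.le_def.mp h.1)
    have hhi : c.toNat ≤ 90 := UInt32.le_iff_toNat_le.mp (Char.le_def.mp h.2)
    have hv : (c.toNat + 32).isValidChar := by left; omega
    have ht := toNat_ofNat_valid (c.toNat + 32) hv
    have hl : PySem.Chars.lowerChar c = Char.ofNat (c.toNat + 32) := by
      simp [PySem.Chars.lowerChar, PySem.Chars.isupper, h.1, h.2]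
    have e1 : ('a' ≤ Char.ofNat (c.toNat + 32)) :=
      Char.le_def.mpr (UInt32.le_iff_toNat_le.mpr (by show 97 ≤ (Char.ofNat _).toNat; rw [ht]; omega))
    have e2 : (Char.ofNat (c.toNat + 32) ≤ 'z') :=
      Char.le_def.mpr (UInt32.le_iff_toNat_le.mpr (by show (Char.ofNat _).toNat ≤ 122; rw [ht]; omega))
    rw [hl]
    simp [PySem.Chars.isalpha, PySem.Chars.isupper, PySem.Chars.islower, e1, e2, h.1, h.2]
  · have hl : PySem.Chars.lowerChar c = c := by
      simp only [PySem.Chars.lowerChar, PySem.Chars.isupper]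
      rw [if_neg (by simpa using fun h1 h2 => h ⟨h1, h2⟩)]
    rw [hl]

-- A's guard  '!!!' == subj[-3:]  is  endswith
lemma guard_eq (l : List Char) :
    (['!', '!', '!'] == PySem.Chars.slice l (some (-3)) none) = PySem.Chars.endswith l ['!', '!', '!'] := by
  have h := PySem.List.slice_from_neg_ofNat l 3 (by norm_num)
  simp only [PySem.Chars.slice_eq_listSlice, h]
  by_cases he : PySem.Chars.endswith l ['!', '!', '!'] = true
  · rw [he]
    have hs := (PySem.Chars.endswith_iff l _).mp he
    rw [List.suffix_iff_eq_drop] at hs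
    simpa using hs
  · rw [Bool.not_eq_true] at he
    rw [he, beq_eq_false_iff_ne]
    intro hd
    have hsuf : ['!', '!', '!'] <:+ l := List.suffix_iff_eq_drop.mpr (by simpa using hd)
    rw [← PySem.Chars.endswith_iff] at hsuf
    simp [hsuf] at he

-- A's accumulator loop is: filter+lower, then collapse relative to the sentinel
lemma foldA (l : List Char) : ∀ (acc : List Char) (p : Char), acc.getLast? = some p →
    (l.foldl (fun s c =>
      if PySem.Chars.isalpha (PySem.Chars.lowerChar c) &&
          (PySem.List.pyGet? s (-1) != some (PySem.Chars.lowerChar c)) then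
        s ++ [PySem.Chars.lowerChar c] else s) acc)
    = acc ++ collapse p ((l.filter PySem.Chars.isalpha).map PySem.Chars.lowerChar) := by
  induction l with
  | nil => intro acc p _; simp [collapse]
  | cons c t ih =>
    intro acc p hp
    have hget : PySem.List.pyGet? acc (-1) = some p := by
      rw [PySem.List.pyGet?_neg_one acc, hp]
    rw [List.foldl_cons]
    by_cases ha : PySem.Chars.isalpha c = true
    · have hfil : (c :: t).filter PySem.Chars.isalpha = c :: t.filter PySem.Chars.isalpha := by
        simp [ha]
      by_cases heq : PySem.Chars.lowerChar c = p
      · have hcond : (PySem.Chars.isalpha (PySem.Chars.lowerChar c) &&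
            (PySem.List.pyGet? acc (-1) != some (PySem.Chars.lowerChar c))) = false := by
          simp [hget, heq]
        rw [hcond, if_neg Bool.false_ne_true, ih acc p hp, hfil]
        simp [collapse, heq]
      · have hcond : (PySem.Chars.isalpha (PySem.Chars.lowerChar c) &&
            (PySem.List.pyGet? acc (-1) != some (PySem.Chars.lowerChar c))) = true := by
          rw [isalpha_lowerChar, ha, hget]
          simpa [bne] using fun h => (heq h.symm).elim
        rw [hcond, if_pos rfl, ih (acc ++ [PySem.Chars.lowerChar c]) (PySem.Chars.lowerChar c) (by simp), hfil]
        simp [collapse, heq]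
    · have hcond : (PySem.Chars.isalpha (PySem.Chars.lowerChar c) &&
          (PySem.List.pyGet? acc (-1) != some (PySem.Chars.lowerChar c))) = false := by
        rw [isalpha_lowerChar]
        simp [ha]
      rw [hcond, if_neg Bool.false_ne_true]
      have hfil : (c :: t).filter PySem.Chars.isalpha = t.filter PySem.Chars.isalpha := by
        simp [ha]
      rw [ih acc p hp, hfil]

lemma isIn_cons (kh a : Char) (kt x : List Char) (h : kh ≠ a) :
    PySem.Chars.isIn (kh :: kt) (a :: x) = PySem.Chars.isIn (kh :: kt) x := by
  by_cases he : PySem.Chars.isIn (kh :: kt) x = true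
  · rw [he, PySem.Chars.isIn_iff_infix]
    exact List.infix_cons_iff.mpr (Or.inr ((PySem.Chars.isIn_iff_infix _ _).mp he))
  · rw [Bool.not_eq_true] at he
    rw [he, PySem.Chars.isIn_eq_false_iff]
    intro hinf
    rcases List.infix_cons_iff.mp hinf with hp | hi
    · exact h (List.cons_prefix_cons.mp hp).1
    · exact (PySem.Chars.isIn_eq_false_iff _ _).mp he hi

-- skipRun basics
lemma skipRun_head (c : Char) (l : List Char) : (skipRun c l).head? ≠ some c := by
  induction l with
  | nil => simp [skipRun]
  | cons x t ih =>
    by_cases h : x = c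
    · simpa [skipRun, h] using ih
    · simp [skipRun, h]

lemma skipRun_suffix (c : Char) (l : List Char) : skipRun c l <:+ l := by
  induction l with
  | nil => simp [skipRun]
  | cons x t ih =>
    by_cases h : x = c
    · simpa [skipRun, h] using ih.trans (List.suffix_cons x t)
    · simp [skipRun, h]

lemma skipRun_length_le (c : Char) (l : List Char) : (skipRun c l).length ≤ l.length :=
  (skipRun_suffix c l).length_le

lemma collapse_skipRun (q : Char) (l : List Char) : collapse q l = collapse q (skipRun q l) := by
  induction l with
  | nil => rfl
  | cons x t ih =>
    by_cases h : x = q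
    · simpa [collapse, skipRun, h] using ih
    · simp [collapse, skipRun, h]

-- generic split of "some suffix matches" over a cons
lemma exists_drop_cons (f : List Char → Bool) (x : Char) (t : List Char) :
    (∃ j, f ((x :: t).drop j) = true) ↔ f (x :: t) = true ∨ ∃ j, f (t.drop j) = true := by
  constructor
  · rintro ⟨j, hj⟩
    cases j with
    | zero => exact Or.inl hj
    | succ j => exact Or.inr ⟨j, by simpa using hj⟩
  · rintro (h | ⟨j, hj⟩)
    · exact ⟨0, h⟩
    · exact ⟨j + 1, by simpa using hj⟩

-- a match somewhere in a suffix is a match somewhere in the list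
lemma exists_drop_of_suffix (f : List Char → Bool) {l' l : List Char} (h : l' <:+ l)
    (he : ∃ i, f (l'.drop i) = true) : ∃ j, f (l.drop j) = true := by
  obtain ⟨s, rfl⟩ := h
  obtain ⟨i, hi⟩ := he
  refine ⟨s.length + i, ?_⟩
  have hd : (s ++ l').drop (s.length + i) = l'.drop i := by
    rw [← List.drop_drop, List.drop_left]
  rw [hd]
  exact hi

-- decidable "no two adjacent characters equal" (holds for the three keywords)
def adjOK : List Char → Bool
  | [] => true
  | [_] => true
  | a :: b :: t => (a != b) && adjOK (b :: t)

lemma adjOK_tail {c : Char} {ks : List Char} (h : adjOK (c :: ks) = true) : adjOK ks = true := by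
  cases ks with
  | nil => rfl
  | cons b t => exact (by simpa [adjOK] using h : ¬ c = b ∧ adjOK (b :: t) = true).2

lemma adjOK_head {c : Char} {ks : List Char} (h : adjOK (c :: ks) = true) :
    ∀ d, ks.head? = some d → d ≠ c := by
  intro d hd
  cases ks with
  | nil => simp at hd
  | cons b t =>
    have hb : b = d := by simpa using hd
    subst hb
    have hne := (by simpa [adjOK] using h : ¬ c = b ∧ adjOK (b :: t) = true).1
    exact fun he => hne he.symm

lemma matchKw_cons_cons (c x : Char) (ks t : List Char) :
    matchKw (c :: ks) (x :: x :: t) = matchKw (c :: ks) (x :: t) := by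
  by_cases h : x = c
  · subst h
    simp [matchKw, skipRun]
  · simp [matchKw, h]

-- a match inside a leading x-run is absorbed into the match at the run's start
lemma run_absorb (x c : Char) (ks : List Char) : ∀ (t : List Char),
    (∃ j, matchKw (c :: ks) (t.drop j) = true) →
    matchKw (c :: ks) (x :: t) = true ∨ ∃ i, matchKw (c :: ks) ((skipRun x t).drop i) = true := by
  intro t
  induction t with
  | nil => rintro ⟨j, hj⟩; exact absurd hj (by simp [matchKw])
  | cons y t' ih =>
    intro hex
    by_cases hy : y = x
    · subst hy
      rcases (exists_drop_cons _ y t').mp hex with h0 | hrest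
      · exact Or.inl (by rw [matchKw_cons_cons]; exact h0)
      · rcases ih hrest with h1 | h2
        · exact Or.inl (by rw [matchKw_cons_cons]; exact h1)
        · exact Or.inr (by simpa [skipRun] using h2)
    · right
      simpa [skipRun, hy] using hex

-- dropping a leading q-run does not change whether some suffix matches (keyword head ≠ q)
lemma skip_exists (q c : Char) (ks : List Char) (hc : c ≠ q) : ∀ (l : List Char),
    (∃ j, matchKw (c :: ks) (l.drop j) = true) ↔
    (∃ i, matchKw (c :: ks) ((skipRun q l).drop i) = true) := by
  intro l
  induction l with
  | nil => simp [skipRun]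
  | cons y t ih =>
    by_cases hy : y = q
    · have hcy : ¬ (y = c) := fun h => hc (h.symm.trans hy)
      have h0 : matchKw (c :: ks) (y :: t) = false := by
        simp only [matchKw]
        rw [if_neg hcy]
      rw [exists_drop_cons, h0]
      simp only [skipRun, if_pos hy]
      simpa using ih
    · simp [skipRun, hy]

-- prefix of the collapsed list = repetition-tolerant match, aligned at a non-q head
lemma prefix_match : ∀ (n : Nat) (r : List Char) (q : Char) (ks : List Char), r.length ≤ n →
    adjOK ks = true → (∀ c, ks.head? = some c → c ≠ q) →
    (∀ x, r.head? = some x → x ≠ q) →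
    ((ks <+: collapse q r) ↔ matchKw ks r = true) := by
  intro n
  induction n with
  | zero =>
    intro r q ks hn _ _ _
    have hr : r = [] := List.length_eq_zero_iff.mp (Nat.le_zero.mp hn)
    subst hr
    cases ks with
    | nil => simp [collapse, matchKw]
    | cons c ks' => simp [collapse, matchKw]
  | succ n ih =>
    intro r q ks hn hch hkh hrh
    cases ks with
    | nil => simp [matchKw]
    | cons c ks' =>
      cases r with
      | nil => simp [collapse, matchKw]
      | cons x t =>
        have hx : x ≠ q := hrh x rfl
        have hcol : collapse q (x :: t) = x :: collapse x (skipRun x t) := by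
          rw [collapse, if_neg hx, collapse_skipRun]
        rw [hcol]
        by_cases hcx : x = c
        · subst hcx
          have hch' : adjOK ks' = true := adjOK_tail hch
          have hkh' : ∀ d, ks'.head? = some d → d ≠ x := adjOK_head hch
          have hlen : (skipRun x t).length ≤ n := by
            have := skipRun_length_le x t
            simp at hn; omega
          have := ih (skipRun x t) x ks' hlen hch' hkh'
            (fun y hy he => skipRun_head x t (by rw [hy, he]))
          simp only [matchKw, if_pos]
          rw [List.cons_prefix_cons]
          simpa using this
        · simp only [matchKw]
          rw [if_neg hcx, List.cons_prefix_cons]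
          constructor
          · rintro ⟨h, -⟩
            exact absurd h.symm hcx
          · intro h
            exact absurd h Bool.false_ne_true

-- keyword occurs in the collapsed list ↔ the repetition-tolerant matcher succeeds at some start
lemma collapse_isIn : ∀ (n : Nat) (r : List Char) (q c : Char) (ks : List Char), r.length ≤ n →
    adjOK (c :: ks) = true → (∀ x, r.head? = some x → x ≠ q) →
    (PySem.Chars.isIn (c :: ks) (collapse q r) = true ↔
      ∃ i, matchKw (c :: ks) (r.drop i) = true) := by
  intro n
  induction n with
  | zero =>
    intro r q c ks hn _ _
    have hr : r = [] := List.length_eq_zero_iff.mp (Nat.le_zero.mp hn)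
    subst hr
    constructor
    · intro h
      exact absurd ((PySem.Chars.isIn_iff_infix _ _).mp h) (by simp [collapse])
    · rintro ⟨j, hj⟩
      exact absurd hj (by simp [matchKw])
  | succ n ih =>
    intro r q c ks hn hch hrh
    cases r with
    | nil =>
      constructor
      · intro h
        exact absurd ((PySem.Chars.isIn_iff_infix _ _).mp h) (by simp [collapse])
      · rintro ⟨j, hj⟩
        exact absurd hj (by simp [matchKw])
    | cons x t =>
      have hx : x ≠ q := hrh x rfl
      have hcol : collapse q (x :: t) = x :: collapse x (skipRun x t) := by
        rw [collapse, if_neg hx, collapse_skipRun]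
      have hlen : (skipRun x t).length ≤ n := by
        have := skipRun_length_le x t
        simp at hn; omega
      have hskh : ∀ y, (skipRun x t).head? = some y → y ≠ x :=
        fun y hy he => skipRun_head x t (by rw [hy, he])
      -- first disjunct: keyword is a prefix here ↔ matcher succeeds at start 0
      have hd1 : ((c :: ks) <+: x :: collapse x (skipRun x t)) ↔
          matchKw (c :: ks) (x :: t) = true := by
        rw [List.cons_prefix_cons]
        by_cases hcx : c = x
        · subst hcx
          have := prefix_match n (skipRun c t) c ks hlen (adjOK_tail hch) (adjOK_head hch) hskh
          simp only [matchKw, if_pos]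
          simpa using this
        · simp only [matchKw]
          rw [if_neg (fun h : x = c => hcx h.symm)]
          constructor
          · rintro ⟨h, -⟩
            exact absurd h hcx
          · intro h
            exact absurd h Bool.false_ne_true
      -- second disjunct: keyword occurs deeper
      have hd2 := ih (skipRun x t) x c ks hlen hch hskh
      rw [hcol]
      constructor
      · intro h
        rcases List.infix_cons_iff.mp ((PySem.Chars.isIn_iff_infix _ _).mp h) with hp | hi
        · exact ⟨0, by simpa using hd1.mp hp⟩
        · have := hd2.mp ((PySem.Chars.isIn_iff_infix _ _).mpr hi)
          exact exists_drop_of_suffix _ ((skipRun_suffix x t).trans (List.suffix_cons x t)) this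
      · intro hex
        rcases (exists_drop_cons _ x t).mp hex with h0 | hrest
        · exact (PySem.Chars.isIn_iff_infix _ _).mpr
            (List.infix_cons_iff.mpr (Or.inl (hd1.mpr h0)))
        · rcases run_absorb x c ks t hrest with h1 | h2
          · exact (PySem.Chars.isIn_iff_infix _ _).mpr
              (List.infix_cons_iff.mpr (Or.inl (hd1.mpr h1)))
          · exact (PySem.Chars.isIn_iff_infix _ _).mpr
              (List.infix_cons_iff.mpr (Or.inr ((PySem.Chars.isIn_iff_infix _ _).mp (hd2.mpr h2))))

-- per-keyword bridge between A's substring test and B's scanning matcher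
lemma key_eq (letters : List Char) (c : Char) (ks : List Char)
    (hch : adjOK (c :: ks) = true) (hc : c ≠ 'i') :
    PySem.Chars.isIn (c :: ks) ('i' :: collapse 'i' letters)
      = (List.range letters.length).any (fun i => matchKw (c :: ks) (letters.drop i)) := by
  rw [isIn_cons c 'i' ks _ hc, collapse_skipRun]
  have h1 := collapse_isIn (skipRun 'i' letters).length (skipRun 'i' letters) 'i' c ks
    le_rfl hch (fun y hy he => skipRun_head 'i' letters (by rw [hy, he]))
  have h2 := (skip_exists 'i' c ks hc letters).symm
  have h3 : (∃ j, matchKw (c :: ks) (letters.drop j) = true) ↔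
      ((List.range letters.length).any (fun i => matchKw (c :: ks) (letters.drop i)) = true) := by
    rw [List.any_eq_true]
    constructor
    · rintro ⟨j, hj⟩
      by_cases hjn : j < letters.length
      · exact ⟨j, List.mem_range.mpr hjn, hj⟩
      · rw [List.drop_eq_nil_of_le (by omega)] at hj
        exact absurd hj (by simp [matchKw])
    · rintro ⟨j, _, hj⟩
      exact ⟨j, hj⟩
  rw [Bool.eq_iff_iff]
  exact (h1.trans h2).trans h3

-- ===== VERDICT (by name: the statement is the Claim_ definition above) =====
theorem is_stressful_spec : Claim_equal_is_stressful := by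
  intro subj _
  unfold Spec_is_stressful
  simp only [is_stressful, is_stressful_alt]
  rw [guard_eq]
  by_cases hg : (!subj.toList.isEmpty &&
      (PySem.Chars.endswith subj.toList ['!', '!', '!'] || pyStrIsupper subj.toList)) = true
  · rw [if_pos hg, if_pos hg]
  · rw [if_neg hg, if_neg hg]
    rw [foldA subj.toList ['i'] 'i' rfl]
    have hs : (['i'] ++ collapse 'i' ((subj.toList.filter PySem.Chars.isalpha).map PySem.Chars.lowerChar))
        = 'i' :: collapse 'i' ((subj.toList.filter PySem.Chars.isalpha).map PySem.Chars.lowerChar) := rfl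
    rw [hs]
    have hh : ("help".toList : List Char) = 'h' :: ['e', 'l', 'p'] := by decide
    have ha : ("asap".toList : List Char) = 'a' :: ['s', 'a', 'p'] := by decide
    have hu : ("urgent".toList : List Char) = 'u' :: ['r', 'g', 'e', 'n', 't'] := by decide
    simp only [List.any_cons, List.any_nil, hh, ha, hu]
    rw [key_eq _ 'h' _ (by decide) (by decide), key_eq _ 'a' _ (by decide) (by decide),
      key_eq _ 'u' _ (by decide) (by decide)]
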